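-- pv_equiv track=rewrite | github.com/winterash2/algorithm_study_2021_1 | 210119/DFS/BFS/괄호 변환/이동재.py | make_u_v
-- ===== SOURCE A (Python) =====
-- def make_u_v(w):
--     u = ""
--     v = ""
--     check = 0
--     done = False
--     for elem in w:
--         if done:
--             v += elem
--         else:
--             u += elem
--             if elem == '(':
--                 check += 1
--             else:
--                 check -= 1
--             if check == 0:
--                 done = True
--     return [u, v]
-- ===== SOURCE B (Python) =====
-- def make_u_v(w):
--     balance = 0
--     for i, elem in enumerate(w):
--         balance += 1 if elem == '(' else -1
--         if balance == 0:
--             return [w[:i + 1], w[i + 1:]]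
--     return [w, ""]
-- ===== Notes on version B (the rewrite author's own statement) =====
-- stated objective: simpler
-- what changed: Replaces the two growing accumulator strings and the done flag by a single balance counter that finds the first zero-balance index and slices w once there.
import Mathlib
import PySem

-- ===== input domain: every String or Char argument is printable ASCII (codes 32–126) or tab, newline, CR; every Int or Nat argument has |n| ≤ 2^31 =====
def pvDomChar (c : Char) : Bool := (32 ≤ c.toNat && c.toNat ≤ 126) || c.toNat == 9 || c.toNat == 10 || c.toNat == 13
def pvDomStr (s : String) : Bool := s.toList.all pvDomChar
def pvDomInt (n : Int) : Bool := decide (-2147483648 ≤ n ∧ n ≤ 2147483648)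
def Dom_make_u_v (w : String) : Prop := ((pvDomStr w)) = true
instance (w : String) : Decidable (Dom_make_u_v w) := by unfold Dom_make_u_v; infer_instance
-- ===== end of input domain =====

-- B replaces A's two accumulator strings and done flag by a single balance counter
-- finding the first zero-balance index, then slicing once (objective: simpler).

-- ===== PORT A =====
-- state: (u, v, check, done), u and v kept as List Char (string concatenation u += elem)
def make_u_v_step : List Char × List Char × Int × Bool → Char →
    List Char × List Char × Int × Bool
  | (u, v, check, true), c => (u, v ++ [c], check, true)
  | (u, v, check, false), c =>
    let u' := u ++ [c]
    let check' := if c = '(' then check + 1 else check - 1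
    if check' = 0 then (u', v, check', true) else (u', v, check', false)

def make_u_v (w : String) : List String :=
  let st := w.toList.foldl make_u_v_step ([], [], 0, false)
  [String.ofList st.1, String.ofList st.2.1]

-- ===== PORT B =====
-- enumerate(w) starting at k
def pyEnumFrom (k : Nat) : List Char → List (Nat × Char)
  | [] => []
  | c :: cs => (k, c) :: pyEnumFrom (k + 1) cs

def make_u_v_alt_go (w : List Char) (balance : Int) : List (Nat × Char) → List String
  | [] => [String.ofList w, ""]
  | (i, elem) :: rest =>
    let balance' := balance + (if elem = '(' then 1 else -1)
    if balance' = 0 then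
      [String.ofList (PySem.List.slice w none (some ((i : Int) + 1))),
       String.ofList (PySem.List.slice w (some ((i : Int) + 1)) none)]
    else make_u_v_alt_go w balance' rest

def make_u_v_alt (w : String) : List String :=
  make_u_v_alt_go w.toList 0 (pyEnumFrom 0 w.toList)

-- ===== PRECONDITION & SPEC =====
def Spec_make_u_v (w : String) (out : List String) : Prop := out = make_u_v_alt w
instance (w : String) (out : List String) : Decidable (Spec_make_u_v w out) := by unfold Spec_make_u_v; infer_instance

-- ===== CLAIM (what is proved, stated in full; the proofs are below) =====
def Claim_equal_make_u_v : Prop := ∀ (w : String), Dom_make_u_v w → Spec_make_u_v w (make_u_v w)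

-- ===== LEMMAS AND PROOFS =====

-- once done = true, the fold only appends the remaining chars to v
lemma foldA_done (cs : List Char) (u v : List Char) (ch : Int) :
    cs.foldl make_u_v_step (u, v, ch, true) = (u, v ++ cs, ch, true) := by
  induction cs generalizing v with
  | nil => simp
  | cons c cs ih => rw [List.foldl_cons, make_u_v_step, ih]; simp

-- main invariant: processing cs with prefix p already consumed, balance bal, not done
lemma main_inv (cs : List Char) (p : List Char) (bal : Int) :
    (let st := cs.foldl make_u_v_step (p, [], bal, false)
     [String.ofList st.1, String.ofList st.2.1])
    = make_u_v_alt_go (p ++ cs) bal (pyEnumFrom p.length cs) := by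
  induction cs generalizing p bal with
  | nil => simp [make_u_v_alt_go, pyEnumFrom]
  | cons c cs ih =>
    simp only [pyEnumFrom, make_u_v_alt_go, List.foldl, make_u_v_step]
    by_cases hc : (if c = '(' then bal + 1 else bal - 1) = 0
    · have hb : bal + (if c = '(' then 1 else -1) = 0 := by
        split_ifs at hc ⊢ <;> omega
      simp only [hc, hb, if_true]
      have h1 : PySem.List.slice (p ++ c :: cs) none (some ((p.length : Int) + 1))
          = p ++ [c] := by
        have := PySem.List.slice_to_natCast (p ++ c :: cs) (p.length + 1)
        push_cast at this
        rw [this]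
        rw [show p.length + 1 = p.length + 1 from rfl, List.take_append]
        simp
      have h2 : PySem.List.slice (p ++ c :: cs) (some ((p.length : Int) + 1)) none
          = cs := by
        have := PySem.List.slice_from_natCast (p ++ c :: cs) (p.length + 1)
        push_cast at this
        rw [this]
        rw [List.drop_append]
        simp
      simp [foldA_done, h1, h2]
    · have hb : ¬ bal + (if c = '(' then 1 else -1) = 0 := by
        split_ifs at hc ⊢ <;> omega
      simp only [hc, hb, if_false]
      have := ih (p ++ [c]) (if c = '(' then bal + 1 else bal - 1)
      simp only [List.append_assoc, List.singleton_append, List.length_append,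
        List.length_singleton] at this
      rw [this]
      congr 1
      split_ifs <;> ring_nf

-- ===== VERDICT (by name: the statement is the Claim_ definition above) =====
theorem make_u_v_spec : Claim_equal_make_u_v := by
  intro w _
  show make_u_v w = make_u_v_alt w
  have := main_inv w.toList [] 0
  simpa [make_u_v, make_u_v_alt] using this
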